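-- pv_equiv track=rewrite | github.com/Rubayet19/BRAC-University | 423 Lab- Computer Graphics/lab3.py | get_other_points
-- ===== SOURCE A (Python) =====
-- def get_other_points (original_points, center_x, center_y):
--     other_points = []
--     zone0_array = []
--     zone1_array = []
--     zone2_array = []
--     zone3_array = []
--     zone4_array = []
--     zone5_array = []
--     zone6_array = []
--     zone7_array = []
--
--     for s in range(len(original_points)):
--         x, y = original_points[s][0], original_points[s][1]
--         zone0_array.append((y+ center_x, x+ center_y))
--         zone1_array.append((x+ center_x, y+ center_y))
--         zone2_array.append((-x+ center_x, y+ center_y))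
--         zone3_array.append((-y+ center_x, x+ center_y))
--         zone4_array.append((-y+ center_x, -x+ center_y))
--         zone5_array.append((-x+ center_x, -y+ center_y))
--         zone6_array.append((x+ center_x, -y+ center_y))
--         zone7_array.append((y+ center_x, -x+ center_y))
--
--     other_points.append(zone0_array)
--     other_points.append(zone1_array)
--     other_points.append(zone2_array)
--     other_points.append(zone3_array)
--     other_points.append(zone4_array)
--     other_points.append(zone5_array)
--     other_points.append(zone6_array)
--     other_points.append(zone7_array)
--
--     return other_points
-- ===== SOURCE B (Python) =====
-- def get_other_points(original_points, center_x, center_y):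
--     # Only two zones are computed from the input (identity and coordinate-swap);
--     # the remaining six are derived by reflecting already-built zone lists
--     # about the center (x -> 2*center_x - x, y -> 2*center_y - y).
--     def reflect_x(zone):
--         return [(2 * center_x - u, v) for (u, v) in zone]
--
--     def reflect_y(zone):
--         return [(u, 2 * center_y - v) for (u, v) in zone]
--
--     zone1 = [(x + center_x, y + center_y) for (x, y) in original_points]
--     zone0 = [(y + center_x, x + center_y) for (x, y) in original_points]
--     zone2 = reflect_x(zone1)
--     zone3 = reflect_x(zone0)
--     zone6 = reflect_y(zone1)
--     zone7 = reflect_y(zone0)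
--     zone4 = reflect_y(zone3)
--     zone5 = reflect_y(zone2)
--     return [zone0, zone1, zone2, zone3, zone4, zone5, zone6, zone7]
-- ===== Notes on version B (the rewrite author's own statement) =====
-- stated objective: alternative
-- what changed: Instead of applying all eight octant transforms to every input point, B computes only the two seed zones (identity and coordinate-swap) from the input and derives the other six zones by reflecting already-computed zone lists about the center.
import Mathlib
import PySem

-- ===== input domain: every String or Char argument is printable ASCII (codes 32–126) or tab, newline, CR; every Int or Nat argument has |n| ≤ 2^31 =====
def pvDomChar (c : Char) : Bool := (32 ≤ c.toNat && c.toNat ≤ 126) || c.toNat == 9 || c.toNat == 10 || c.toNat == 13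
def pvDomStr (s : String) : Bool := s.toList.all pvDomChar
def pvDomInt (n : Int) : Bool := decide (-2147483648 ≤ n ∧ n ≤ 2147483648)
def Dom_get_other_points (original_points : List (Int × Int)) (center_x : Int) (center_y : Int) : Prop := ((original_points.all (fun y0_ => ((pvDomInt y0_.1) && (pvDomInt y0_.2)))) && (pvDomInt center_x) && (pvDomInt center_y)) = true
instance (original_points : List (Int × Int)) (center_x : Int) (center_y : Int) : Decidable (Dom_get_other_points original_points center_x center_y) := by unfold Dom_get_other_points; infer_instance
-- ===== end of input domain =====

-- B computes only the two seed zones (identity, swap) from the input and derives the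
-- other six by reflecting already-computed zone lists about the center (objective: alternative).

-- ===== PORT A =====
-- A loops s over range(len(original_points)) and reads original_points[s]; the index is
-- always in range, so the fold carries the element directly (exact for this loop shape),
-- appending to the eight zone accumulators exactly as A does.
def get_other_points (original_points : List (Int × Int)) (center_x : Int) (center_y : Int) : List (List (Int × Int)) :=
  let st := original_points.foldl
    (fun (z : List (Int × Int) × List (Int × Int) × List (Int × Int) × List (Int × Int) ×
              List (Int × Int) × List (Int × Int) × List (Int × Int) × List (Int × Int)) p =>
      let x := p.1; let y := p.2
      ( z.1 ++ [(y + center_x, x + center_y)],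
        z.2.1 ++ [(x + center_x, y + center_y)],
        z.2.2.1 ++ [(-x + center_x, y + center_y)],
        z.2.2.2.1 ++ [(-y + center_x, x + center_y)],
        z.2.2.2.2.1 ++ [(-y + center_x, -x + center_y)],
        z.2.2.2.2.2.1 ++ [(-x + center_x, -y + center_y)],
        z.2.2.2.2.2.2.1 ++ [(x + center_x, -y + center_y)],
        z.2.2.2.2.2.2.2 ++ [(y + center_x, -x + center_y)] ))
    ([], [], [], [], [], [], [], [])
  [st.1, st.2.1, st.2.2.1, st.2.2.2.1, st.2.2.2.2.1, st.2.2.2.2.2.1, st.2.2.2.2.2.2.1, st.2.2.2.2.2.2.2]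

-- ===== PORT B =====
def get_other_points_alt (original_points : List (Int × Int)) (center_x : Int) (center_y : Int) : List (List (Int × Int)) :=
  let reflect_x := fun (zone : List (Int × Int)) => zone.map (fun q => (2 * center_x - q.1, q.2))
  let reflect_y := fun (zone : List (Int × Int)) => zone.map (fun q => (q.1, 2 * center_y - q.2))
  let zone1 := original_points.map (fun p => (p.1 + center_x, p.2 + center_y))
  let zone0 := original_points.map (fun p => (p.2 + center_x, p.1 + center_y))
  let zone2 := reflect_x zone1
  let zone3 := reflect_x zone0
  let zone6 := reflect_y zone1
  let zone7 := reflect_y zone0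
  let zone4 := reflect_y zone3
  let zone5 := reflect_y zone2
  [zone0, zone1, zone2, zone3, zone4, zone5, zone6, zone7]

-- ===== PRECONDITION & SPEC =====
def Spec_get_other_points (original_points : List (Int × Int)) (center_x : Int) (center_y : Int) (out : List (List (Int × Int))) : Prop := out = get_other_points_alt original_points center_x center_y
instance (original_points : List (Int × Int)) (center_x : Int) (center_y : Int) (out : List (List (Int × Int))) : Decidable (Spec_get_other_points original_points center_x center_y out) := by unfold Spec_get_other_points; infer_instance

-- ===== CLAIM =====
def Claim_equal_get_other_points : Prop := ∀ (original_points : List (Int × Int)) (center_x : Int) (center_y : Int), Dom_get_other_points original_points center_x center_y → Spec_get_other_points original_points center_x center_y (get_other_points original_points center_x center_y)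

-- ===== LEMMAS AND PROOFS =====
-- Invariant of A's fold: starting from accumulators (a0..a7), it produces each
-- accumulator extended by the corresponding zone's transform mapped over the points.
theorem get_other_points_fold_inv (center_x center_y : Int)
    (pts : List (Int × Int))
    (a0 a1 a2 a3 a4 a5 a6 a7 : List (Int × Int)) :
    pts.foldl
      (fun (z : List (Int × Int) × List (Int × Int) × List (Int × Int) × List (Int × Int) ×
                List (Int × Int) × List (Int × Int) × List (Int × Int) × List (Int × Int)) p =>
        let x := p.1; let y := p.2
        ( z.1 ++ [(y + center_x, x + center_y)],
          z.2.1 ++ [(x + center_x, y + center_y)],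
          z.2.2.1 ++ [(-x + center_x, y + center_y)],
          z.2.2.2.1 ++ [(-y + center_x, x + center_y)],
          z.2.2.2.2.1 ++ [(-y + center_x, -x + center_y)],
          z.2.2.2.2.2.1 ++ [(-x + center_x, -y + center_y)],
          z.2.2.2.2.2.2.1 ++ [(x + center_x, -y + center_y)],
          z.2.2.2.2.2.2.2 ++ [(y + center_x, -x + center_y)] ))
      (a0, a1, a2, a3, a4, a5, a6, a7)
    = ( a0 ++ pts.map (fun p => (p.2 + center_x, p.1 + center_y)),
        a1 ++ pts.map (fun p => (p.1 + center_x, p.2 + center_y)),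
        a2 ++ pts.map (fun p => (-p.1 + center_x, p.2 + center_y)),
        a3 ++ pts.map (fun p => (-p.2 + center_x, p.1 + center_y)),
        a4 ++ pts.map (fun p => (-p.2 + center_x, -p.1 + center_y)),
        a5 ++ pts.map (fun p => (-p.1 + center_x, -p.2 + center_y)),
        a6 ++ pts.map (fun p => (p.1 + center_x, -p.2 + center_y)),
        a7 ++ pts.map (fun p => (p.2 + center_x, -p.1 + center_y)) ) := by
  induction pts generalizing a0 a1 a2 a3 a4 a5 a6 a7 with
  | nil => simp
  | cons p rest ih =>
      simp only [List.foldl_cons, List.map_cons]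
      rw [ih]
      simp [List.append_assoc]

-- ===== VERDICT =====
theorem get_other_points_spec : Claim_equal_get_other_points := by
  intro pts cx cy _
  unfold Spec_get_other_points get_other_points get_other_points_alt
  simp only [get_other_points_fold_inv, List.nil_append, List.map_map, Function.comp_def]
  simp only [List.cons.injEq, and_true]
  and_intros <;> first
    | trivial
    | (apply List.map_congr_left; intro p _; rw [Prod.mk.injEq]; constructor <;> ring)
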